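-- pv_equiv track=rewrite | github.com/isikyamac/grant_applications | grant_evaluator/aggregator.py | _items_mentioned_by_n
-- ===== SOURCE A (Python) =====
-- from collections import defaultdict
--
-- def _items_mentioned_by_n(all_items: list[list[str]], min_count: int) -> list[str]:
--     """Return items mentioned by at least min_count reviewers."""
--     counts = defaultdict(int)
--     canonical = {}
--     for reviewer_items in all_items:
--         seen_this_reviewer = set()
--         for item in reviewer_items:
--             key = item.strip().lower()
--             if key not in seen_this_reviewer:
--                 seen_this_reviewer.add(key)
--                 counts[key] += 1
--                 if key not in canonical:
--                     canonical[key] = item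
--     return [canonical[k] for k, v in counts.items() if v >= min_count]
-- ===== SOURCE B (Python) =====
-- def _items_mentioned_by_n(all_items: list[list[str]], min_count: int) -> list[str]:
--     """Return items mentioned by at least min_count reviewers."""
--     flat = [item for items in all_items for item in items]
--     canonical = {}
--     for item in flat:
--         key = item.strip().lower()
--         if key not in canonical:
--             canonical[key] = item
--     return [item for key, item in canonical.items()
--             if sum(1 for items in all_items
--                    if any(x.strip().lower() == key for x in items)) >= min_count]
-- ===== Notes on version B (the rewrite author's own statement) =====
-- stated objective: simpler
-- what changed: Replaces the incremental counter dict with per-reviewer 'seen' sets by a single first-occurrence canonical pass over the flattened items, recomputing each surviving key's reviewer count with a direct scan of all_items.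
import Mathlib
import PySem

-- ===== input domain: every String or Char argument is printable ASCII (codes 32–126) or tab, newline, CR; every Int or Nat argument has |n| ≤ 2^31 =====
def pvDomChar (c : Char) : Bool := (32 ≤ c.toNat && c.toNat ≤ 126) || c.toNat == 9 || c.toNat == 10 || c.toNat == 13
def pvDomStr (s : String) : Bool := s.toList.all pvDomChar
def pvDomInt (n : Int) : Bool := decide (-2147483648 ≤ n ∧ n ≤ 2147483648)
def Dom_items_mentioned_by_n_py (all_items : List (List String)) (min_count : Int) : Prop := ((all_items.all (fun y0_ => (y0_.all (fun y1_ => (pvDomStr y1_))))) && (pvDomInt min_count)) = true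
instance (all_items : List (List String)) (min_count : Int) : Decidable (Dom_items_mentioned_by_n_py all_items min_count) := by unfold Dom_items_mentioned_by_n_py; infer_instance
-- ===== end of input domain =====

-- B replaces A's incremental counter dict + per-reviewer seen sets by one first-occurrence
-- canonical pass plus a direct recount per surviving key (objective: simpler; not faster).

-- item.strip().lower(), used by both Pythons
def pvNorm (s : String) : String := PySem.Str.lower (PySem.Str.strip s)

-- ===== PORT A =====
-- inner-loop body: state = (seen_this_reviewer, counts, canonical)
def pvAInner (st : PySem.Set String × PySem.Dict String Int × PySem.Dict String String)
    (item : String) : PySem.Set String × PySem.Dict String Int × PySem.Dict String String :=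
  let key := pvNorm item
  if PySem.Set.contains st.1 key then st
  else
    (PySem.Set.add st.1 key,
     (st.2.1).modify key 0 (· + 1),
     if (st.2.2).contains key then st.2.2 else (st.2.2).insert key item)

-- outer-loop body: one reviewer, fresh 'seen' set
def pvAOuter (st : PySem.Dict String Int × PySem.Dict String String)
    (reviewer_items : List String) : PySem.Dict String Int × PySem.Dict String String :=
  let r := reviewer_items.foldl pvAInner (PySem.Set.empty, st.1, st.2)
  (r.2.1, r.2.2)

def items_mentioned_by_n_py (all_items : List (List String)) (min_count : Int) : List String :=
  let st := all_items.foldl pvAOuter (PySem.Dict.empty, PySem.Dict.empty)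
  -- canonical[k]: every key of counts is also a key of canonical, so the "" default is never used
  (st.1.items.filter (fun kv => decide (min_count ≤ kv.2))).map (fun kv => (st.2).getD kv.1 "")

-- ===== PORT B =====
-- sum(1 for items in all_items if any(x.strip().lower() == key for x in items))
def pvCnt (all_items : List (List String)) (key : String) : Int :=
  (all_items.countP (fun items => items.any (fun x => pvNorm x == key)) : Int)

-- loop body: if key not in canonical: canonical[key] = item
def pvBStep (d : PySem.Dict String String) (item : String) : PySem.Dict String String :=
  if d.contains (pvNorm item) then d else d.insert (pvNorm item) item

def items_mentioned_by_n_py_alt (all_items : List (List String)) (min_count : Int) : List String :=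
  let flat := all_items.flatMap (fun items => items)
  let canonical := flat.foldl pvBStep (PySem.Dict.empty : PySem.Dict String String)
  (canonical.items.filter (fun kv => decide (min_count ≤ pvCnt all_items kv.1))).map (fun kv => kv.2)

-- ===== PRECONDITION & SPEC =====
def Spec_items_mentioned_by_n_py (all_items : List (List String)) (min_count : Int) (out : List String) : Prop := out = items_mentioned_by_n_py_alt all_items min_count
instance (all_items : List (List String)) (min_count : Int) (out : List String) : Decidable (Spec_items_mentioned_by_n_py all_items min_count out) := by unfold Spec_items_mentioned_by_n_py; infer_instance

-- ===== CLAIM (what is proved, stated in full; the proofs are below) =====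
def Claim_equal_items_mentioned_by_n_py : Prop := ∀ (all_items : List (List String)) (min_count : Int), Dom_items_mentioned_by_n_py all_items min_count → Spec_items_mentioned_by_n_py all_items min_count (items_mentioned_by_n_py all_items min_count)

-- ===== LEMMAS AND PROOFS =====

-- A's inner loop, characterised: counts gain 1 on each key of the reviewer not already seen,
-- keys extend by the reviewer's keys, canonical gains the first item of each fresh key.
theorem pvA_inner_spec (items : List String) (seen : PySem.Set String)
    (c : PySem.Dict String Int) (d : PySem.Dict String String)
    (h1 : ∀ k, PySem.Set.contains seen k = true → c.contains k = true)
    (h2 : ∀ k, PySem.Set.contains seen k = true → d.contains k = true) :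
    (∀ k, ((items.foldl pvAInner (seen, c, d)).2.1).getD k 0 =
        c.getD k 0 + (if PySem.Set.contains seen k = true then 0
          else if items.any (fun it => pvNorm it == k) = true then 1 else 0)) ∧
    ((items.foldl pvAInner (seen, c, d)).2.1).keys
        = PySem.Set.update c.keys (items.map pvNorm) ∧
    (∀ k, ((items.foldl pvAInner (seen, c, d)).2.2).get? k =
        if d.contains k = true then d.get? k
        else items.find? (fun it => pvNorm it == k)) := by
  induction items generalizing seen c d with
  | nil =>
    refine ⟨fun k => by simp, by simp [PySem.Set.update_nil], fun k => ?_⟩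
    by_cases hc : d.contains k = true
    · simp [hc]
    · simp [hc, (PySem.Dict.get?_eq_none_iff_contains d k).2 (by simpa using hc)]
  | cons item rest ih =>
    simp only [List.foldl_cons, List.map_cons, PySem.Set.update_cons]
    by_cases hs : PySem.Set.contains seen (pvNorm item) = true
    · have hm : pvNorm item ∈ seen := (PySem.Set.contains_iff seen _).1 hs
      rw [show pvAInner (seen, c, d) item = (seen, c, d) by simp [pvAInner, hs, hm]]
      obtain ⟨ih1, ih2, ih3⟩ := ih seen c d h1 h2
      refine ⟨fun k => ?_, ?_, fun k => ?_⟩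
      · rw [ih1 k]
        by_cases he : pvNorm item = k
        · subst he; simp [hs, hm]
        · have : (pvNorm item == k) = false := by simp [he]
          simp [this]
      · rw [ih2, PySem.Set.add_of_mem
          ((PySem.Dict.contains_iff_mem_keys c _).1 (h1 _ hs))]
      · rw [ih3 k]
        by_cases he : pvNorm item = k
        · subst he
          simp [h2 _ hs]
        · have : (pvNorm item == k) = false := by simp [he]
          simp [this]
    · have hs' : PySem.Set.contains seen (pvNorm item) = false := by simpa using hs
      have hm' : pvNorm item ∉ seen := fun h => hs ((PySem.Set.contains_iff seen _).2 h)
      rw [show pvAInner (seen, c, d) item =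
          (PySem.Set.add seen (pvNorm item), c.modify (pvNorm item) 0 (· + 1),
           if d.contains (pvNorm item) then d else d.insert (pvNorm item) item) by
        simp [pvAInner, hs', hm']]
      set c' := c.modify (pvNorm item) 0 (· + 1) with hc'
      set d' := (if d.contains (pvNorm item) then d else d.insert (pvNorm item) item) with hd'
      have h1' : ∀ k, PySem.Set.contains (PySem.Set.add seen (pvNorm item)) k = true →
          c'.contains k = true := by
        intro k hk
        rw [PySem.Set.contains_iff] at hk
        rcases (PySem.Set.mem_add seen (pvNorm item) k).1 hk with hk | hk
        · rw [hc', PySem.Dict.contains_modify]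
          simp [h1 k ((PySem.Set.contains_iff seen k).2 hk)]
        · subst hk; rw [hc', PySem.Dict.contains_modify]; simp
      have h2' : ∀ k, PySem.Set.contains (PySem.Set.add seen (pvNorm item)) k = true →
          d'.contains k = true := by
        intro k hk
        rw [PySem.Set.contains_iff] at hk
        rcases (PySem.Set.mem_add seen (pvNorm item) k).1 hk with hk | hk
        · have := h2 k ((PySem.Set.contains_iff seen k).2 hk)
          rw [hd']; split
          · exact this
          · rw [PySem.Dict.contains_insert]; simp [this]
        · subst hk; rw [hd']; split
          · assumption
          · rw [PySem.Dict.contains_insert]; simp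
      obtain ⟨ih1, ih2, ih3⟩ := ih (PySem.Set.add seen (pvNorm item)) c' d' h1' h2'
      refine ⟨fun k => ?_, ?_, fun k => ?_⟩
      · rw [ih1 k]
        by_cases he : pvNorm item = k
        · subst he
          have hadd : PySem.Set.contains (PySem.Set.add seen (pvNorm item)) (pvNorm item) = true := by
            rw [PySem.Set.contains_iff, PySem.Set.mem_add]; right; rfl
          rw [hadd, hc', PySem.Dict.getD_modify_self]
          simp [hs', hm']
        · have hbe : (pvNorm item == k) = false := by simp [he]
          have hadd : PySem.Set.contains (PySem.Set.add seen (pvNorm item)) k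
              = PySem.Set.contains seen k := by
            by_cases hmk : k ∈ seen
            · simp [PySem.Set.contains_iff, hmk, PySem.Set.mem_add]
            · have : ¬ k ∈ PySem.Set.add seen (pvNorm item) := by
                rw [PySem.Set.mem_add]; rintro (h | h); exact hmk h; exact he h.symm
              simp [PySem.Set.contains_iff, hmk, this]
          rw [hadd, hc', PySem.Dict.getD_modify_of_ne c 0 _ (Ne.symm he)]
          simp [hbe]
      · rw [ih2, hc', PySem.Dict.keys_modify]
        by_cases hck : c.contains (pvNorm item) = true
        · rw [PySem.Dict.keys_insert_of_contains]
          · rw [PySem.Set.add_of_mem ((PySem.Dict.contains_iff_mem_keys c _).1 hck)]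
          · exact hck
        · rw [PySem.Dict.keys_insert_of_not_contains c _ (by simpa using hck),
            PySem.Set.add_of_not_mem (fun hmk => hck ((PySem.Dict.contains_iff_mem_keys c _).2 hmk))]
      · rw [ih3 k]
        by_cases he : pvNorm item = k
        · subst he
          by_cases hck : d.contains (pvNorm item) = true
          · rw [hd']; simp [hck]
          · have hdk' : d'.contains (pvNorm item) = true := by
              rw [hd']; simp [hck, PySem.Dict.contains_insert]
            rw [hdk']
            simp only [if_true]
            rw [hd']; simp [hck, PySem.Dict.get?_insert_self]
        · have hbe : (pvNorm item == k) = false := by simp [he]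
          have hdc : d'.contains k = d.contains k := by
            rw [hd']; split
            · rfl
            · rw [PySem.Dict.contains_insert]; simp [Ne.symm he]
          have hdg : d'.get? k = d.get? k := by
            rw [hd']; split
            · rfl
            · exact PySem.Dict.get?_insert_of_ne d item (Ne.symm he)
          rw [hdc, hdg]
          simp [hbe]

-- A's outer loop, characterised over the whole input.
theorem pvA_outer_spec (L : List (List String))
    (c : PySem.Dict String Int) (d : PySem.Dict String String) :
    (∀ k, ((L.foldl pvAOuter (c, d)).1).getD k 0 =
        c.getD k 0 + (L.countP (fun its => its.any (fun x => pvNorm x == k)) : Int)) ∧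
    ((L.foldl pvAOuter (c, d)).1).keys
        = PySem.Set.update c.keys ((L.flatMap (fun its => its)).map pvNorm) ∧
    (∀ k, ((L.foldl pvAOuter (c, d)).2).get? k =
        if d.contains k = true then d.get? k
        else (L.flatMap (fun its => its)).find? (fun it => pvNorm it == k)) := by
  induction L generalizing c d with
  | nil =>
    refine ⟨fun k => by simp, by simp [PySem.Set.update_nil], fun k => ?_⟩
    by_cases hc : d.contains k = true
    · simp [hc]
    · simp [hc, (PySem.Dict.get?_eq_none_iff_contains d k).2 (by simpa using hc)]
  | cons its rest ih =>
    have hemp : ∀ k : String, PySem.Set.contains PySem.Set.empty k = true → False := by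
      intro k hk; simp [PySem.Set.empty] at hk
    obtain ⟨i1, i2, i3⟩ := pvA_inner_spec its PySem.Set.empty c d
      (fun k hk => absurd hk (fun h => hemp k h)) (fun k hk => absurd hk (fun h => hemp k h))
    set r := its.foldl pvAInner (PySem.Set.empty, c, d) with hr
    have hstep : pvAOuter (c, d) its = (r.2.1, r.2.2) := rfl
    rw [List.foldl_cons, hstep]
    obtain ⟨j1, j2, j3⟩ := ih r.2.1 r.2.2
    refine ⟨fun k => ?_, ?_, fun k => ?_⟩
    · rw [j1 k, i1 k, List.countP_cons]
      have : PySem.Set.contains PySem.Set.empty k = false := by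
        simp [PySem.Set.empty]
      rw [this]
      by_cases hp : its.any (fun x => pvNorm x == k) = true
      · simp [hp]; ring
      · have hp' : its.any (fun x => pvNorm x == k) = false := by simpa using hp
        rw [hp']; simp
    · rw [j2, i2, List.flatMap_cons, List.map_append, PySem.Set.update_append]
    · rw [j3 k, List.flatMap_cons, List.find?_append]
      by_cases hc : d.contains k = true
      · have hcr : r.2.2.contains k = true := by
          rw [PySem.Dict.contains_eq_isSome_get?, i3 k, if_pos hc,
            ← PySem.Dict.contains_eq_isSome_get?]; exact hc
        rw [if_pos hcr, i3 k]; simp [hc]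
      · have hg : r.2.2.get? k = its.find? (fun it => pvNorm it == k) := by
          rw [i3 k, if_neg hc]
        have hcont : r.2.2.contains k = (its.find? (fun it => pvNorm it == k)).isSome := by
          rw [PySem.Dict.contains_eq_isSome_get?, hg]
        rw [if_neg hc]
        cases hfx : its.find? (fun it => pvNorm it == k) with
        | some x => simp [hcont, hfx, hg]
        | none => simp [hcont, hfx]

-- B's canonical loop, characterised.
theorem pvB_canon_spec (flat : List String) (d : PySem.Dict String String) :
    ((flat.foldl pvBStep d).keys = PySem.Set.update d.keys (flat.map pvNorm)) ∧
    (∀ k, (flat.foldl pvBStep d).get? k =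
      if d.contains k = true then d.get? k
      else flat.find? (fun it => pvNorm it == k)) := by
  induction flat generalizing d with
  | nil =>
    refine ⟨by simp [PySem.Set.update_nil], fun k => ?_⟩
    by_cases hc : d.contains k = true
    · simp [hc]
    · simp [hc, (PySem.Dict.get?_eq_none_iff_contains d k).2 (by simpa using hc)]
  | cons item rest ih =>
    simp only [List.foldl_cons, List.map_cons, PySem.Set.update_cons]
    by_cases hc : d.contains (pvNorm item) = true
    · rw [show pvBStep d item = d by simp [pvBStep, hc]]
      obtain ⟨ihk, ihg⟩ := ih d
      refine ⟨?_, fun k => ?_⟩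
      · rw [ihk, PySem.Set.add_of_mem ((PySem.Dict.contains_iff_mem_keys d _).1 hc)]
      · rw [ihg k]
        by_cases h : d.contains k = true
        · simp [h]
        · have hne : (pvNorm item == k) = false := by
            by_cases he : pvNorm item = k
            · exact absurd (he ▸ hc) h
            · simp [he]
          simp [h, hne]
    · rw [show pvBStep d item = d.insert (pvNorm item) item by simp [pvBStep, hc]]
      obtain ⟨ihk, ihg⟩ := ih (d.insert (pvNorm item) item)
      refine ⟨?_, fun k => ?_⟩
      · rw [ihk, PySem.Dict.keys_insert_of_not_contains d item (by simpa using hc),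
          PySem.Set.add_of_not_mem (fun hm => hc ((PySem.Dict.contains_iff_mem_keys d _).2 hm))]
      · rw [ihg k]
        by_cases he : pvNorm item = k
        · subst he
          simp [hc, PySem.Dict.get?_insert_self]
        · have hne : (k == pvNorm item) = false := by simp [Ne.symm he]
          have hne' : (pvNorm item == k) = false := by simp [he]
          rw [PySem.Dict.contains_insert]
          simp only [hne, Bool.false_or]
          by_cases h : d.contains k = true
          · simp [h, PySem.Dict.get?_insert_of_ne d item (Ne.symm he)]
          · simp [h, hne']

-- both programs equal the common closed form: keys in first-mention order, filtered by the
-- reviewer count, mapped to the first item carrying the key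
theorem main_eq (all_items : List (List String)) (min_count : Int) :
    items_mentioned_by_n_py all_items min_count
      = items_mentioned_by_n_py_alt all_items min_count := by
  obtain ⟨a1, a2, a3⟩ := pvA_outer_spec all_items PySem.Dict.empty PySem.Dict.empty
  obtain ⟨b1, b2⟩ := pvB_canon_spec (all_items.flatMap (fun its => its)) PySem.Dict.empty
  set flat := all_items.flatMap (fun its => its) with hflat
  set st := all_items.foldl pvAOuter (PySem.Dict.empty, PySem.Dict.empty) with hst
  set canonical := flat.foldl pvBStep (PySem.Dict.empty : PySem.Dict String String) with hcanon
  have ha1 : ∀ k, st.1.getD k 0 = pvCnt all_items k := by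
    intro k; rw [a1 k, PySem.Dict.getD_empty, zero_add]; rfl
  have ha2 : st.1.keys = PySem.Set.ofList (flat.map pvNorm) := by
    rw [a2, PySem.Dict.keys_empty, PySem.Set.update_nil_left]
  have ha3 : ∀ k, st.2.get? k = flat.find? (fun it => pvNorm it == k) := by
    intro k; rw [a3 k, if_neg (by simp [PySem.Dict.contains_empty])]
  have hb1 : canonical.keys = PySem.Set.ofList (flat.map pvNorm) := by
    rw [b1, PySem.Dict.keys_empty, PySem.Set.update_nil_left]
  have hb2 : ∀ k, canonical.get? k = flat.find? (fun it => pvNorm it == k) := by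
    intro k; rw [b2 k, if_neg (by simp [PySem.Dict.contains_empty])]
  have hnodA : st.1.keys.Nodup := by rw [ha2]; exact PySem.Set.nodup_ofList _
  have hnodB : canonical.keys.Nodup := by rw [hb1]; exact PySem.Set.nodup_ofList _
  show (st.1.items.filter (fun kv => decide (min_count ≤ kv.2))).map (fun kv => (st.2).getD kv.1 "")
    = (canonical.items.filter (fun kv => decide (min_count ≤ pvCnt all_items kv.1))).map (fun kv => kv.2)
  rw [PySem.Dict.items_eq_map_keys st.1 hnodA 0, PySem.Dict.items_eq_map_keys canonical hnodB "",
    List.filter_map, List.filter_map, List.map_map, List.map_map, ha2, hb1]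
  rw [List.filter_congr (l := PySem.Set.ofList (flat.map pvNorm))
    (q := fun k => decide (min_count ≤ pvCnt all_items k))
    (fun k _ => by simp only [Function.comp_apply, ha1 k])]
  refine List.map_congr_left (fun k _ => ?_)
  simp only [Function.comp_apply]
  rw [PySem.Dict.getD_eq_get?_getD, PySem.Dict.getD_eq_get?_getD, ha3 k, hb2 k]

-- ===== VERDICT (by name: the statement is the Claim_ definition above) =====
theorem items_mentioned_by_n_py_spec : Claim_equal_items_mentioned_by_n_py := by
  intro all_items min_count _
  exact main_eq all_items min_count
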